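-- pv_equiv track=rewrite | github.com/jitenkr2030/VisualVerse | open-source/engine/content-metadata/services/verticals/chem_verse/chem_reasoning_engine.py | verify_balance
-- ===== SOURCE A (Python) =====
-- from typing import Dict, List, Optional, Any, Tuple, Callable
--
-- def verify_balance(
--     reactants: List[str],
--     products: List[str],
--     coefficients: Dict[str, int]
-- ) -> bool:
--     """Verify that an equation is balanced."""
--     def get_count(formula: str) -> Dict[str, int]:
--         counts = {}
--         i = 0
--         while i < len(formula):
--             if formula[i].isupper():
--                 symbol = formula[i]
--                 i += 1
--                 if i < len(formula) and formula[i].islower():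
--                     symbol += formula[i]
--                     i += 1
--                 count = 1
--                 if i < len(formula) and formula[i].isdigit():
--                     num_str = ""
--                     while i < len(formula) and formula[i].isdigit():
--                         num_str += formula[i]
--                         i += 1
--                     count = int(num_str)
--                 counts[symbol] = counts.get(symbol, 0) + count
--             else:
--                 i += 1
--         return counts
--
--     reactant_counts = {}
--     for formula in reactants:
--         coeff = coefficients.get(formula, 1)
--         atom_counts = get_count(formula)
--         for atom, count in atom_counts.items():
--             reactant_counts[atom] = reactant_counts.get(atom, 0) + count * coeff
--
--     product_counts = {}
--     for formula in products:
--         coeff = coefficients.get(formula, 1)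
--         atom_counts = get_count(formula)
--         for atom, count in atom_counts.items():
--             product_counts[atom] = product_counts.get(atom, 0) + count * coeff
--
--     return reactant_counts == product_counts
-- ===== SOURCE B (Python) =====
-- def verify_balance(reactants, products, coefficients):
--     """Verify that an equation is balanced (element chunking + single signed net pass)."""
--     def tokens(formula):
--         # group chars into element chunks starting at each uppercase letter
--         chunks = []
--         cur = None
--         for c in formula:
--             if c.isupper():
--                 if cur is not None:
--                     chunks.append(cur)
--                 cur = c
--             elif cur is not None:
--                 cur += c
--         if cur is not None:
--             chunks.append(cur)
--         # parse each chunk: symbol (1 or 2 chars), then its digit prefix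
--         toks = []
--         for chunk in chunks:
--             k = 2 if len(chunk) > 1 and chunk[1].islower() else 1
--             digits = ""
--             for c in chunk[k:]:
--                 if not c.isdigit():
--                     break
--                 digits += c
--             toks.append((chunk[:k], int(digits) if digits else 1))
--         return toks
--
--     net = {}
--     rkeys = set()
--     pkeys = set()
--     for formulas, sign, keys in ((reactants, 1, rkeys), (products, -1, pkeys)):
--         for formula in formulas:
--             coeff = coefficients.get(formula, 1)
--             for sym, n in tokens(formula):
--                 keys.add(sym)
--                 net[sym] = net.get(sym, 0) + sign * n * coeff
--     return rkeys == pkeys and all(v == 0 for v in net.values())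
-- ===== Notes on version B (the rewrite author's own statement) =====
-- stated objective: alternative
-- what changed: Parsing groups characters into per-element chunks that are parsed separately instead of A's index-based scanner with a nested digit loop, and A's two per-side count dicts compared with dict equality are replaced by a single signed net dict plus per-side key sets, returning 'key sets equal and net all zero'.
import Mathlib
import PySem

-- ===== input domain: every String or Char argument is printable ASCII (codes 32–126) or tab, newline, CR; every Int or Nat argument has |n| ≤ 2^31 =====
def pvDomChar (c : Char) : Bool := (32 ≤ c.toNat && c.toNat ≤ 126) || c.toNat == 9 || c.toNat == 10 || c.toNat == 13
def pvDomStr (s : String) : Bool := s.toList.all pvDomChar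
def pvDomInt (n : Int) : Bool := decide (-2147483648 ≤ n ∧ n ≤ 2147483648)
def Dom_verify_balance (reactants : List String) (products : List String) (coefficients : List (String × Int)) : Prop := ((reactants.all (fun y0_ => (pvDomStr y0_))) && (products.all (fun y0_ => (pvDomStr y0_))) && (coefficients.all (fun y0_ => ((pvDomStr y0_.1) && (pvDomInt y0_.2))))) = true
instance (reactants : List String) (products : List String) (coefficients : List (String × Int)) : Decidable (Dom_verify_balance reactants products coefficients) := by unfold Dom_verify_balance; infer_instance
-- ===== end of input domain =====

-- B re-implements A by grouping characters into per-element chunks that are parsed separately, and by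
-- replacing the two per-side count dicts compared with dict equality by one signed net dict plus per-side
-- key sets (equal key sets and an all-zero net); same observable behaviour, alternative decomposition.

-- ===== PORT A =====
-- inner `while … isdigit()` loop of get_count: returns (num_str, remaining input)
def aDigitRun : List Char → List Char → List Char × List Char
  | [], num => (num, [])
  | c :: rest, num =>
    if PySem.Chars.isdigit c then aDigitRun rest (num ++ [c]) else (num, c :: rest)

-- needed by aScan's termination proof
theorem aDigitRun_snd_le (l num : List Char) : (aDigitRun l num).2.length ≤ l.length := by
  induction l generalizing num with
  | nil => simp [aDigitRun]
  | cons c rest ih =>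
    simp only [aDigitRun]
    split
    · exact (ih _).trans (by simp)
    · simp

-- int(num_str); exact here since get_count only calls it on a nonempty digit run
def aIntOf (num : List Char) : Int := (PySem.Int.ofChars? num).getD 0

-- the `while i < len(formula)` scanner of get_count (index scan ported as recursion on the rest)
def aScan : List Char → PySem.Dict (List Char) Int → PySem.Dict (List Char) Int
  | [], counts => counts
  | c :: rest, counts =>
    if PySem.Chars.isupper c then
      match rest with
      | [] => counts.modify [c] 0 (· + 1)
      | c2 :: rest2 =>
        if PySem.Chars.islower c2 then
          let p := aDigitRun rest2 []
          aScan p.2 (counts.modify [c, c2] 0 (· + (if p.1 = [] then 1 else aIntOf p.1)))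
        else
          let p := aDigitRun (c2 :: rest2) []
          aScan p.2 (counts.modify [c] 0 (· + (if p.1 = [] then 1 else aIntOf p.1)))
    else aScan rest counts
termination_by l _ => l.length
decreasing_by
  · have := aDigitRun_snd_le rest2 []; simp; omega
  · have := aDigitRun_snd_le (c2 :: rest2) []; simp at this ⊢; omega
  · simp

-- one of A's two identical accumulation loops (`for formula in …: … for atom, count in …`)
def aAccumSide (formulas : List String) (coefficients : List (String × Int)) :
    PySem.Dict (List Char) Int :=
  formulas.foldl (fun rc formula =>
    let coeff := (PySem.Dict.mk coefficients).getD formula 1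
    let atomCounts := aScan formula.toList PySem.Dict.empty
    atomCounts.items.foldl (fun rc p => rc.modify p.1 0 (· + p.2 * coeff)) rc)
    PySem.Dict.empty

-- Python `dict ==` (order-insensitive: same keys, same values) — exact for dicts with Nodup keys
def pyDictEq (d1 d2 : PySem.Dict (List Char) Int) : Bool :=
  d1.keys.all (fun k => d2.get? k == d1.get? k) && d2.keys.all (fun k => d1.contains k)

def verify_balance (reactants : List String) (products : List String)
    (coefficients : List (String × Int)) : Bool :=
  pyDictEq (aAccumSide reactants coefficients) (aAccumSide products coefficients)

-- ===== PORT B =====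
-- one step of B's chunk-grouping loop; state = (chunks so far, current chunk)
def bChunksStep (st : List (List Char) × Option (List Char)) (c : Char) :
    List (List Char) × Option (List Char) :=
  if PySem.Chars.isupper c then
    match st.2 with
    | some cur => (st.1 ++ [cur], some [c])
    | none => (st.1, some [c])
  else
    match st.2 with
    | some cur => (st.1, some (cur ++ [c]))
    | none => st

-- the `if cur is not None: chunks.append(cur)` flush after the loop
def bFinish (st : List (List Char) × Option (List Char)) : List (List Char) :=
  match st.2 with
  | some cur => st.1 ++ [cur]
  | none => st.1

def bChunks (l : List Char) : List (List Char) := bFinish (l.foldl bChunksStep ([], none))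

-- the for/break digit-prefix loop over chunk[k:]
def bDigits : List Char → List Char
  | [] => []
  | c :: rest => if PySem.Chars.isdigit c then c :: bDigits rest else []

def bParseChunk (chunk : List Char) : List Char × Int :=
  let k : Nat :=
    match chunk with
    | _ :: c2 :: _ => if PySem.Chars.islower c2 then 2 else 1
    | _ => 1
  let digits := bDigits (chunk.drop k)
  (chunk.take k, if digits = [] then 1 else (PySem.Int.ofChars? digits).getD 0)

def bTokens (l : List Char) : List (List Char × Int) :=
  (bChunks l).foldl (fun toks chunk => toks ++ [bParseChunk chunk]) []

-- body of B's innermost loop: keys.add(sym); net[sym] = net.get(sym, 0) + sign*n*coeff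
def bStep (sign coeff : Int) (st : PySem.Dict (List Char) Int × PySem.Set (List Char))
    (t : List Char × Int) : PySem.Dict (List Char) Int × PySem.Set (List Char) :=
  (st.1.modify t.1 0 (· + sign * t.2 * coeff), st.2.add t.1)

-- one iteration of B's outer `for formulas, sign, keys in …` loop
def bSide (formulas : List String) (coefficients : List (String × Int)) (sign : Int)
    (st : PySem.Dict (List Char) Int × PySem.Set (List Char)) :
    PySem.Dict (List Char) Int × PySem.Set (List Char) :=
  formulas.foldl (fun st formula =>
    let coeff := (PySem.Dict.mk coefficients).getD formula 1
    (bTokens formula.toList).foldl (bStep sign coeff) st) st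

def verify_balance_alt (reactants : List String) (products : List String)
    (coefficients : List (String × Int)) : Bool :=
  let r := bSide reactants coefficients 1 (PySem.Dict.empty, PySem.Set.empty)
  let p := bSide products coefficients (-1) (r.1, PySem.Set.empty)
  PySem.Set.equal r.2 p.2 && p.1.values.all (fun v => v == 0)

-- ===== PRECONDITION & SPEC =====
def Spec_verify_balance (reactants : List String) (products : List String) (coefficients : List (String × Int)) (out : Bool) : Prop := out = verify_balance_alt reactants products coefficients
instance (reactants : List String) (products : List String) (coefficients : List (String × Int)) (out : Bool) : Decidable (Spec_verify_balance reactants products coefficients out) := by unfold Spec_verify_balance; infer_instance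

-- ===== CLAIM (what is proved, stated in full; the proofs are below) =====
def Claim_equal_verify_balance : Prop := ∀ (reactants : List String) (products : List String) (coefficients : List (String × Int)), Dom_verify_balance reactants products coefficients → Spec_verify_balance reactants products coefficients (verify_balance reactants products coefficients)

-- ===== LEMMAS AND PROOFS =====

-- character-class facts (ASCII ranges are disjoint)
theorem chr_lower_not_upper (c : Char) (h : PySem.Chars.islower c = true) :
    PySem.Chars.isupper c = false := by
  simp only [PySem.Chars.islower, Bool.and_eq_true, decide_eq_true_eq,
    Char.le_def, UInt32.le_iff_toNat_le] at h
  obtain ⟨h1, h2⟩ := h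
  have e1 : ('a').val.toNat = 97 := rfl
  rw [e1] at h1
  refine Bool.and_eq_false_iff.mpr (Or.inr ?_)
  simp only [PySem.Chars.isupper, decide_eq_false_iff_not, Char.le_def, UInt32.le_iff_toNat_le]
  have e2 : ('Z').val.toNat = 90 := rfl
  rw [e2]
  omega

theorem chr_digit_not_upper (c : Char) (h : PySem.Chars.isdigit c = true) :
    PySem.Chars.isupper c = false := by
  simp only [PySem.Chars.isdigit, Bool.and_eq_true, decide_eq_true_eq,
    Char.le_def, UInt32.le_iff_toNat_le] at h
  obtain ⟨h1, h2⟩ := h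
  have e1 : ('9').val.toNat = 57 := rfl
  rw [e1] at h2
  refine Bool.and_eq_false_iff.mpr (Or.inl ?_)
  simp only [PySem.Chars.isupper, decide_eq_false_iff_not, Char.le_def, UInt32.le_iff_toNat_le]
  have e2 : ('A').val.toNat = 65 := rfl
  rw [e2]
  omega

-- recursive characterisation of B's chunk-grouping loop
def chunksR : List Char → List (List Char)
  | [] => []
  | c :: rest =>
    if PySem.Chars.isupper c then
      (c :: rest.takeWhile (fun x => !PySem.Chars.isupper x)) ::
        chunksR (rest.dropWhile (fun x => !PySem.Chars.isupper x))
    else chunksR rest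
termination_by l => l.length
decreasing_by
  · have := (List.dropWhile_sublist (l := rest) (p := fun x => !PySem.Chars.isupper x)).length_le
    simp; omega
  · simp

theorem bDigits_eq (l : List Char) : bDigits l = l.takeWhile PySem.Chars.isdigit := by
  induction l with
  | nil => rfl
  | cons c rest ih =>
    simp only [bDigits, List.takeWhile_cons]
    split <;> simp_all

theorem aDigitRun_eq (l acc : List Char) :
    aDigitRun l acc = (acc ++ l.takeWhile PySem.Chars.isdigit, l.dropWhile PySem.Chars.isdigit) := by
  induction l generalizing acc with
  | nil => simp [aDigitRun]
  | cons c rest ih =>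
    simp only [aDigitRun, List.takeWhile_cons, List.dropWhile_cons]
    split <;> simp_all

theorem takeWhile_digit_notUp (l : List Char) :
    (l.takeWhile (fun x => !PySem.Chars.isupper x)).takeWhile PySem.Chars.isdigit
      = l.takeWhile PySem.Chars.isdigit := by
  induction l with
  | nil => rfl
  | cons c rest ih =>
    by_cases hd : PySem.Chars.isdigit c
    · simp [List.takeWhile_cons, chr_digit_not_upper c hd, hd, ih]
    · by_cases hu : PySem.Chars.isupper c <;> simp [List.takeWhile_cons, hu, hd]

theorem chunksR_dropWhile_notUp (l : List Char) :
    chunksR (l.dropWhile (fun x => !PySem.Chars.isupper x)) = chunksR l := by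
  induction l with
  | nil => rfl
  | cons c rest ih =>
    by_cases hu : PySem.Chars.isupper c
    · simp [List.dropWhile_cons, hu]
    · simp only [List.dropWhile_cons, hu]
      rw [if_pos (by simp [hu])]
      rw [ih, chunksR]
      simp [hu]

theorem chunksR_dropWhile_digit (l : List Char) :
    chunksR (l.dropWhile PySem.Chars.isdigit)
      = chunksR (l.dropWhile (fun x => !PySem.Chars.isupper x)) := by
  induction l with
  | nil => rfl
  | cons c rest ih =>
    by_cases hd : PySem.Chars.isdigit c
    · simp only [List.dropWhile_cons, hd, if_pos, chr_digit_not_upper c hd]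
      rw [ih]
      simp [chr_digit_not_upper c hd]
    · by_cases hu : PySem.Chars.isupper c
      · simp [List.dropWhile_cons, hd, hu]
      · simp only [List.dropWhile_cons, hd, hu]
        rw [if_neg (by simp), if_pos (by simp [hu]), chunksR_dropWhile_notUp, chunksR]
        simp [hu]

theorem bfold_some (l : List Char) (parts : List (List Char)) (cur : List Char) :
    bFinish (l.foldl bChunksStep (parts, some cur))
      = parts ++ (cur ++ l.takeWhile (fun x => !PySem.Chars.isupper x)) ::
          chunksR (l.dropWhile (fun x => !PySem.Chars.isupper x)) := by
  induction l generalizing parts cur with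
  | nil => simp [bFinish, chunksR]
  | cons c rest ih =>
    by_cases hu : PySem.Chars.isupper c
    · simp only [List.foldl_cons, bChunksStep, hu, if_pos]
      rw [ih]
      simp [List.takeWhile_cons, List.dropWhile_cons, hu, chunksR]
    · simp only [List.foldl_cons, bChunksStep, hu]
      rw [if_neg (by simp [hu])]
      rw [ih]
      simp [List.takeWhile_cons, List.dropWhile_cons, hu]

theorem bfold_none (l : List Char) (parts : List (List Char)) :
    bFinish (l.foldl bChunksStep (parts, none)) = parts ++ chunksR l := by
  induction l generalizing parts with
  | nil => simp [bFinish, chunksR]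
  | cons c rest ih =>
    by_cases hu : PySem.Chars.isupper c
    · simp only [List.foldl_cons, bChunksStep, hu, if_pos]
      rw [bfold_some]
      simp [chunksR, hu]
    · simp only [List.foldl_cons, bChunksStep, hu]
      rw [if_neg (by simp [hu])]
      rw [ih, chunksR]
      simp [hu]

theorem bChunks_eq (l : List Char) : bChunks l = chunksR l := by
  simpa [bChunks] using bfold_none l []

theorem bTokens_eq (l : List Char) : bTokens l = (chunksR l).map bParseChunk := by
  rw [bTokens, PySem.List.foldl_append_singleton_eq_map, bChunks_eq, List.nil_append]

-- A's scanner produces exactly B's tokens, folded into the dict one at a time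
theorem aScan_eq_aux : ∀ (n : Nat) (l : List Char), l.length ≤ n → ∀ d,
    aScan l d = ((chunksR l).map bParseChunk).foldl (fun d t => d.modify t.1 0 (· + t.2)) d := by
  intro n
  induction n with
  | zero =>
    intro l hl d
    have hnil : l = [] := List.length_eq_zero_iff.mp (Nat.le_zero.mp hl)
    subst hnil
    simp [aScan, chunksR]
  | succ n ih =>
    intro l hl d
    match l with
    | [] => simp [aScan, chunksR]
    | c :: rest =>
      by_cases hu : PySem.Chars.isupper c
      · match rest with
        | [] =>
          simp only [aScan, hu, if_pos, chunksR, List.takeWhile_nil, List.dropWhile_nil,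
            List.map_cons, List.foldl_cons]
          simp [bParseChunk, bDigits, chunksR]
        | c2 :: rest2 =>
          simp only [aScan, hu, if_pos, aDigitRun_eq]
          rw [chunksR]
          rw [if_pos hu]
          by_cases hl2 : PySem.Chars.islower c2
          · have hnu2 : PySem.Chars.isupper c2 = false := chr_lower_not_upper c2 hl2
            rw [if_pos hl2]
            simp only [List.takeWhile_cons, List.dropWhile_cons, hnu2, Bool.not_false,
              if_pos, List.map_cons, List.foldl_cons]
            have hbp : bParseChunk (c :: c2 :: List.takeWhile (fun x => !PySem.Chars.isupper x) rest2)
                = ([c, c2], if List.takeWhile PySem.Chars.isdigit rest2 = [] then 1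
                    else (PySem.Int.ofChars? (List.takeWhile PySem.Chars.isdigit rest2)).getD 0) := by
              simp [bParseChunk, hl2, bDigits_eq, takeWhile_digit_notUp]
            rw [hbp]
            rw [ih (List.dropWhile PySem.Chars.isdigit rest2)
              (by have := (List.dropWhile_sublist (l := rest2) (p := PySem.Chars.isdigit)).length_le
                  simp at hl; omega)]
            rw [chunksR_dropWhile_digit]
            simp [aIntOf]
          · rw [if_neg hl2]
            by_cases hu2 : PySem.Chars.isupper c2
            · have hd2 : PySem.Chars.isdigit c2 = false := by
                by_contra hcon
                simp only [Bool.not_eq_false] at hcon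
                rw [chr_digit_not_upper c2 hcon] at hu2
                exact Bool.false_ne_true hu2
              simp only [List.takeWhile_cons, List.dropWhile_cons, hu2, hd2, Bool.not_true,
                Bool.false_eq_true, if_false, List.map_cons, List.foldl_cons]
              have hbp : bParseChunk [c] = ([c], 1) := by simp [bParseChunk, bDigits]
              rw [hbp]
              rw [ih (c2 :: rest2) (by simp at hl ⊢; omega)]
              simp
            · have hnu2 : (!PySem.Chars.isupper c2) = true := by simp [hu2]
              have htw : List.takeWhile (fun x => !PySem.Chars.isupper x) (c2 :: rest2)
                  = c2 :: List.takeWhile (fun x => !PySem.Chars.isupper x) rest2 := by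
                simp [List.takeWhile_cons, hnu2]
              have hdw : List.dropWhile (fun x => !PySem.Chars.isupper x) (c2 :: rest2)
                  = List.dropWhile (fun x => !PySem.Chars.isupper x) rest2 := by
                simp [List.dropWhile_cons, hnu2]
              rw [htw, hdw]
              simp only [List.map_cons, List.foldl_cons]
              have hbp : bParseChunk (c :: c2 :: List.takeWhile (fun x => !PySem.Chars.isupper x) rest2)
                  = ([c], if List.takeWhile PySem.Chars.isdigit (c2 :: rest2) = [] then 1
                      else (PySem.Int.ofChars? (List.takeWhile PySem.Chars.isdigit (c2 :: rest2))).getD 0) := by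
                have : bDigits (c2 :: List.takeWhile (fun x => !PySem.Chars.isupper x) rest2)
                    = List.takeWhile PySem.Chars.isdigit (c2 :: rest2) := by
                  rw [show (c2 :: List.takeWhile (fun x => !PySem.Chars.isupper x) rest2)
                      = List.takeWhile (fun x => !PySem.Chars.isupper x) (c2 :: rest2) by
                        simp [List.takeWhile_cons, hnu2]]
                  rw [bDigits_eq, takeWhile_digit_notUp]
                simp [bParseChunk, hl2, this]
              rw [hbp]
              rw [ih (List.dropWhile PySem.Chars.isdigit (c2 :: rest2))
                (by have := (List.dropWhile_sublist (l := c2 :: rest2) (p := PySem.Chars.isdigit)).length_le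
                    simp at hl this ⊢; omega)]
              rw [chunksR_dropWhile_digit]
              simp [aIntOf]
              rw [hdw]
      · have hu' : PySem.Chars.isupper c = false := by simpa using hu
        rw [aScan.eq_def]; simp only [hu', Bool.false_eq_true, if_false]
        rw [ih rest (by simp at hl; omega), chunksR]
        simp [hu']

theorem aScan_eq (l : List Char) (d : PySem.Dict (List Char) Int) :
    aScan l d = (bTokens l).foldl (fun d t => d.modify t.1 0 (· + t.2)) d := by
  rw [bTokens_eq]
  exact aScan_eq_aux l.length l le_rfl d

-- abstractions the equivalence is phrased through
def toksOf (f : String) : List (List Char × Int) := bTokens f.toList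
def symsOf (f : String) : List (List Char) := (toksOf f).map (·.1)
def tokSum (a : List Char) (f : String) : Int :=
  (((toksOf f).filter (fun t => t.1 == a)).map (·.2)).sum
def coeffOf (co : List (String × Int)) (f : String) : Int := (PySem.Dict.mk co).getD f 1
def sideSum (co : List (String × Int)) (F : List String) (a : List Char) : Int :=
  (F.map (fun f => tokSum a f * coeffOf co f)).sum
def hasSym (F : List String) (a : List Char) : Prop := ∃ f ∈ F, a ∈ symsOf f

theorem sideSum_zero (co : List (String × Int)) (F : List String) (a : List Char)
    (h : ¬ hasSym F a) : sideSum co F a = 0 := by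
  apply List.sum_eq_zero
  intro x hx
  obtain ⟨f, hf, rfl⟩ := List.mem_map.mp hx
  have hns : a ∉ symsOf f := fun hm => h ⟨f, hf, hm⟩
  have : (toksOf f).filter (fun t => t.1 == a) = [] := by
    rw [List.filter_eq_nil_iff]
    intro t ht hbeq
    exact hns (List.mem_map.mpr ⟨t, ht, (beq_iff_eq.mp hbeq)⟩)
  simp [tokSum, this]

-- value of a generic `d[key(x)] = d.get(key(x), 0) + g(x)` loop
theorem getD_modfold {β : Type} (l : List β) (key : β → List Char) (g : β → Int)
    (d : PySem.Dict (List Char) Int) (a : List Char) :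
    (l.foldl (fun d x => d.modify (key x) 0 (· + g x)) d).getD a 0
      = d.getD a 0 + ((l.filter (fun x => key x == a)).map g).sum := by
  induction l generalizing d with
  | nil => simp
  | cons x l ihl =>
    simp only [List.foldl_cons, List.filter_cons]
    rw [ihl, PySem.Dict.getD_modify]
    by_cases h : a = key x
    · rw [if_pos h]
      rw [show (key x == a) = true from beq_iff_eq.mpr h.symm]
      simp only [if_true, List.map_cons, List.sum_cons]
      rw [h]
      ring
    · rw [if_neg h]
      rw [show (key x == a) = false from beq_eq_false_iff_ne.mpr (fun hh => h hh.symm)]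
      simp

theorem dF_getD (f : String) (a : List Char) :
    (aScan f.toList PySem.Dict.empty).getD a 0 = tokSum a f := by
  rw [aScan_eq, getD_modfold (bTokens f.toList) (fun t => t.1) (fun t => t.2)]
  simp [tokSum, toksOf]

theorem dF_keys (f : String) :
    (aScan f.toList PySem.Dict.empty).keys = PySem.Set.ofList (symsOf f) := by
  rw [aScan_eq,
    PySem.Dict.keys_foldl_modify_key (bTokens f.toList) (fun t => t.1) 0 (fun _ t => (· + t.2))]
  simp [symsOf, toksOf, PySem.Dict.keys_empty, PySem.Set.update_nil_left]

theorem dF_nodup (f : String) : (aScan f.toList PySem.Dict.empty).keys.Nodup := by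
  rw [dF_keys]
  exact PySem.Set.nodup_ofList _

theorem dict_contains_false (d : PySem.Dict (List Char) Int) (a : List Char)
    (hm : a ∉ d.keys) : d.contains a = false := by
  rw [← Bool.not_eq_true]
  intro hc
  exact hm ((PySem.Dict.contains_iff_mem_keys _ _).mp hc)

theorem itemsSum (d : PySem.Dict (List Char) Int) (hnd : d.keys.Nodup) (coeff : Int)
    (a : List Char) :
    ((d.items.filter (fun p => p.1 == a)).map (fun p => p.2 * coeff)).sum
      = d.getD a 0 * coeff := by
  rw [PySem.Dict.items_eq_map_keys d hnd 0, List.filter_map]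
  rw [show ((fun p : List Char × Int => p.1 == a) ∘ (fun k => (k, d.getD k 0)))
      = (fun k => k == a) from rfl]
  rw [List.filter_beq]
  by_cases hm : a ∈ d.keys
  · rw [Nat.le_antisymm (List.nodup_iff_count_le_one.mp hnd a) (List.count_pos_iff.mpr hm)]
    simp
  · rw [List.count_eq_zero_of_not_mem hm]
    rw [PySem.Dict.getD_of_not_contains (h := dict_contains_false d a hm)]
    simp

-- A's per-formula accumulation step, the body of its outer loops
def aStep (co : List (String × Int)) (rc : PySem.Dict (List Char) Int) (formula : String) :
    PySem.Dict (List Char) Int :=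
  (aScan formula.toList PySem.Dict.empty).items.foldl
    (fun rc p => rc.modify p.1 0 (· + p.2 * (PySem.Dict.mk co).getD formula 1)) rc

theorem aAccumSide_eq (F : List String) (co : List (String × Int)) :
    aAccumSide F co = F.foldl (aStep co) PySem.Dict.empty := rfl

theorem aAcc_getD (co : List (String × Int)) : ∀ (F : List String)
    (d : PySem.Dict (List Char) Int) (a : List Char),
    (F.foldl (aStep co) d).getD a 0 = d.getD a 0 + sideSum co F a := by
  intro F
  induction F with
  | nil => simp [sideSum]
  | cons f F ih =>
    intro d a
    simp only [List.foldl_cons]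
    rw [ih]
    rw [show aStep co d f = (aScan f.toList PySem.Dict.empty).items.foldl
        (fun rc p => rc.modify p.1 0 (· + p.2 * coeffOf co f)) d from rfl]
    rw [getD_modfold (aScan f.toList PySem.Dict.empty).items (fun p => p.1)
      (fun p => p.2 * coeffOf co f)]
    rw [itemsSum _ (dF_nodup f) _ a, dF_getD]
    simp only [sideSum, List.map_cons, List.sum_cons]
    ring

theorem aAcc_mem (co : List (String × Int)) : ∀ (F : List String)
    (d : PySem.Dict (List Char) Int) (a : List Char),
    a ∈ (F.foldl (aStep co) d).keys ↔ a ∈ d.keys ∨ hasSym F a := by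
  intro F
  induction F with
  | nil => simp [hasSym]
  | cons f F ih =>
    intro d a
    simp only [List.foldl_cons]
    rw [ih]
    rw [show aStep co d f = (aScan f.toList PySem.Dict.empty).items.foldl
        (fun rc p => rc.modify p.1 0 (· + p.2 * coeffOf co f)) d from rfl]
    rw [PySem.Dict.keys_foldl_modify_key (aScan f.toList PySem.Dict.empty).items
      (fun p : List Char × Int => p.1) 0 (fun _ p => (· + p.2 * coeffOf co f))]
    rw [show (aScan f.toList PySem.Dict.empty).items.map (fun p => p.1)
        = (aScan f.toList PySem.Dict.empty).keys from rfl]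
    rw [dF_keys]
    rw [PySem.Set.mem_update]
    rw [PySem.Set.mem_ofList]
    have hcons : hasSym (f :: F) a ↔ a ∈ symsOf f ∨ hasSym F a := by
      unfold hasSym
      constructor
      · rintro ⟨g, hg, hm⟩
        rcases List.mem_cons.mp hg with rfl | hg'
        · exact Or.inl hm
        · exact Or.inr ⟨g, hg', hm⟩
      · rintro (hm | ⟨g, hg, hm⟩)
        · exact ⟨f, by simp, hm⟩
        · exact ⟨g, List.mem_cons_of_mem f hg, hm⟩
    rw [hcons]
    tauto


theorem get?_char (d : PySem.Dict (List Char) Int) (a : List Char) :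
    d.get? a = if a ∈ d.keys then some (d.getD a 0) else none := by
  by_cases hm : a ∈ d.keys
  · rw [if_pos hm]
    cases hg : d.get? a with
    | none => exact absurd ((PySem.Dict.get?_eq_none_iff_not_mem_keys d a).mp hg) (by simp [hm])
    | some v => rw [PySem.Dict.getD_eq_get?_getD, hg]; rfl
  · rw [if_neg hm]
    exact (PySem.Dict.get?_eq_none_iff_not_mem_keys d a).mpr hm

-- what A computes, in terms of symbol sets and signed per-symbol sums
theorem A_iff (R P : List String) (co : List (String × Int)) :
    verify_balance R P co = true ↔
      ((∀ a, hasSym R a ↔ hasSym P a) ∧ ∀ a, sideSum co R a = sideSum co P a) := by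
  have hRg : ∀ a, (aAccumSide R co).getD a 0 = sideSum co R a := by
    intro a; rw [aAccumSide_eq, aAcc_getD]; simp
  have hPg : ∀ a, (aAccumSide P co).getD a 0 = sideSum co P a := by
    intro a; rw [aAccumSide_eq, aAcc_getD]; simp
  have hRm : ∀ a, a ∈ (aAccumSide R co).keys ↔ hasSym R a := by
    intro a; rw [aAccumSide_eq, aAcc_mem]; simp [PySem.Dict.keys_empty]
  have hPm : ∀ a, a ∈ (aAccumSide P co).keys ↔ hasSym P a := by
    intro a; rw [aAccumSide_eq, aAcc_mem]; simp [PySem.Dict.keys_empty]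
  rw [verify_balance, pyDictEq, Bool.and_eq_true, List.all_eq_true, List.all_eq_true]
  constructor
  · rintro ⟨h1, h2⟩
    have hsub1 : ∀ a, hasSym R a → hasSym P a ∧ sideSum co P a = sideSum co R a := by
      intro a ha
      have := h1 a ((hRm a).mpr ha)
      rw [beq_iff_eq, get?_char, get?_char, if_pos ((hRm a).mpr ha)] at this
      by_cases hp : a ∈ (aAccumSide P co).keys
      · rw [if_pos hp] at this
        refine ⟨(hPm a).mp hp, ?_⟩
        rw [← hPg a, ← hRg a]
        exact Option.some_injective _ this
      · rw [if_neg hp] at this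
        exact absurd this (by simp)
    have hsub2 : ∀ a, hasSym P a → hasSym R a := by
      intro a ha
      have := h2 a ((hPm a).mpr ha)
      exact (hRm a).mp ((PySem.Dict.contains_iff_mem_keys _ _).mp this)
    refine ⟨fun a => ⟨fun h => (hsub1 a h).1, hsub2 a⟩, fun a => ?_⟩
    by_cases ha : hasSym R a
    · exact ((hsub1 a ha).2).symm
    · rw [sideSum_zero co R a ha, sideSum_zero co P a (fun hp => ha (hsub2 a hp))]
  · rintro ⟨hk, hv⟩
    constructor
    · intro a ham
      rw [beq_iff_eq, get?_char, get?_char, if_pos ham,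
        if_pos ((hPm a).mpr ((hk a).mp ((hRm a).mp ham)))]
      rw [hRg, hPg, hv a]
    · intro a ham
      rw [PySem.Dict.contains_iff_mem_keys]
      exact (hRm a).mpr ((hk a).mpr ((hPm a).mp ham))

-- B's paired fold splits into an independent net fold and key-set fold
theorem bStep_fold (sign c : Int) (toks : List (List Char × Int))
    (st : PySem.Dict (List Char) Int × PySem.Set (List Char)) :
    toks.foldl (bStep sign c) st
      = (toks.foldl (fun d t => d.modify t.1 0 (· + sign * t.2 * c)) st.1,
         toks.foldl (fun s t => PySem.Set.add s t.1) st.2) := by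
  cases st with
  | mk n k =>
    exact PySem.List.foldl_prod_mk (fun d (t : List Char × Int) => d.modify t.1 0 (· + sign * t.2 * c))
      (fun s (t : List Char × Int) => PySem.Set.add s t.1) toks n k

def bNetStep (co : List (String × Int)) (sign : Int) (n : PySem.Dict (List Char) Int)
    (f : String) : PySem.Dict (List Char) Int :=
  (toksOf f).foldl (fun d t => d.modify t.1 0 (· + sign * t.2 * coeffOf co f)) n

def bKeyStep (k : PySem.Set (List Char)) (f : String) : PySem.Set (List Char) :=
  (toksOf f).foldl (fun s t => PySem.Set.add s t.1) k

theorem bSide_split (co : List (String × Int)) (sign : Int) : ∀ (F : List String)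
    (n : PySem.Dict (List Char) Int) (k : PySem.Set (List Char)),
    bSide F co sign (n, k) = (F.foldl (bNetStep co sign) n, F.foldl bKeyStep k) := by
  intro F
  induction F with
  | nil => intro n k; rfl
  | cons f F ih =>
    intro n k
    rw [show bSide (f :: F) co sign (n, k)
        = bSide F co sign ((bTokens f.toList).foldl (bStep sign (coeffOf co f)) (n, k)) from rfl]
    rw [bStep_fold]
    rw [ih]
    rfl

theorem sum_map_scaled (l : List (List Char × Int)) (s c : Int) :
    (l.map (fun t => s * t.2 * c)).sum = s * ((l.map (·.2)).sum * c) := by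
  induction l with
  | nil => simp
  | cons x l ih =>
    simp only [List.map_cons, List.sum_cons, ih]
    ring

theorem bNet_getD (co : List (String × Int)) (sign : Int) : ∀ (F : List String)
    (n : PySem.Dict (List Char) Int) (a : List Char),
    (F.foldl (bNetStep co sign) n).getD a 0 = n.getD a 0 + sign * sideSum co F a := by
  intro F
  induction F with
  | nil => simp [sideSum]
  | cons f F ih =>
    intro n a
    simp only [List.foldl_cons]
    rw [ih]
    rw [show bNetStep co sign n f
        = (toksOf f).foldl (fun d t => d.modify t.1 0 (· + sign * t.2 * coeffOf co f)) n from rfl]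
    rw [getD_modfold (toksOf f) (fun t => t.1) (fun t => sign * t.2 * coeffOf co f)]
    rw [sum_map_scaled]
    simp only [sideSum, List.map_cons, List.sum_cons, tokSum]
    ring

theorem bNet_mem (co : List (String × Int)) (sign : Int) : ∀ (F : List String)
    (n : PySem.Dict (List Char) Int) (a : List Char),
    a ∈ (F.foldl (bNetStep co sign) n).keys ↔ a ∈ n.keys ∨ hasSym F a := by
  intro F
  induction F with
  | nil => simp [hasSym]
  | cons f F ih =>
    intro n a
    simp only [List.foldl_cons]
    rw [ih]
    rw [show bNetStep co sign n f
        = (toksOf f).foldl (fun d t => d.modify t.1 0 (· + sign * t.2 * coeffOf co f)) n from rfl]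
    rw [PySem.Dict.keys_foldl_modify_key (toksOf f) (fun t : List Char × Int => t.1) 0
      (fun _ t => (· + sign * t.2 * coeffOf co f))]
    rw [PySem.Set.mem_update]
    have hcons : hasSym (f :: F) a ↔ a ∈ symsOf f ∨ hasSym F a := by
      unfold hasSym
      constructor
      · rintro ⟨g, hg, hm⟩
        rcases List.mem_cons.mp hg with rfl | hg'
        · exact Or.inl hm
        · exact Or.inr ⟨g, hg', hm⟩
      · rintro (hm | ⟨g, hg, hm⟩)
        · exact ⟨f, by simp, hm⟩
        · exact ⟨g, List.mem_cons_of_mem f hg, hm⟩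
    rw [hcons]
    unfold symsOf
    tauto

theorem bNet_nodup (co : List (String × Int)) (sign : Int) : ∀ (F : List String)
    (n : PySem.Dict (List Char) Int), n.keys.Nodup → (F.foldl (bNetStep co sign) n).keys.Nodup := by
  intro F
  induction F with
  | nil => intro n h; exact h
  | cons f F ih =>
    intro n h
    simp only [List.foldl_cons]
    apply ih
    exact PySem.Dict.nodup_keys_foldl_modify_key (toksOf f) (fun t : List Char × Int => t.1) 0
      (fun _ t => (· + sign * t.2 * coeffOf co f)) n h

theorem bKeys_mem : ∀ (F : List String) (k : PySem.Set (List Char)) (a : List Char),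
    a ∈ F.foldl bKeyStep k ↔ a ∈ k ∨ hasSym F a := by
  intro F
  induction F with
  | nil => simp [hasSym]
  | cons f F ih =>
    intro k a
    simp only [List.foldl_cons]
    rw [ih]
    rw [show bKeyStep k f = (toksOf f).foldl (fun s t => PySem.Set.add s t.1) k from rfl]
    rw [← PySem.Set.update_map_eq_foldl_add (toksOf f) (fun t : List Char × Int => t.1) k]
    rw [PySem.Set.mem_update]
    have hcons : hasSym (f :: F) a ↔ a ∈ symsOf f ∨ hasSym F a := by
      unfold hasSym
      constructor
      · rintro ⟨g, hg, hm⟩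
        rcases List.mem_cons.mp hg with rfl | hg'
        · exact Or.inl hm
        · exact Or.inr ⟨g, hg', hm⟩
      · rintro (hm | ⟨g, hg, hm⟩)
        · exact ⟨f, by simp, hm⟩
        · exact ⟨g, List.mem_cons_of_mem f hg, hm⟩
    rw [hcons]
    unfold symsOf
    tauto

-- what B computes, in the same terms
theorem B_iff (R P : List String) (co : List (String × Int)) :
    verify_balance_alt R P co = true ↔
      ((∀ a, hasSym R a ↔ hasSym P a) ∧ ∀ a, sideSum co R a = sideSum co P a) := by
  rw [show verify_balance_alt R P co
      = (PySem.Set.equal (bSide R co 1 (PySem.Dict.empty, PySem.Set.empty)).2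
          (bSide P co (-1) ((bSide R co 1 (PySem.Dict.empty, PySem.Set.empty)).1, PySem.Set.empty)).2
        && (bSide P co (-1) ((bSide R co 1 (PySem.Dict.empty, PySem.Set.empty)).1,
              PySem.Set.empty)).1.values.all (fun v => v == 0)) from rfl]
  rw [bSide_split, bSide_split]
  have hnetR : ∀ a, (R.foldl (bNetStep co 1) PySem.Dict.empty).getD a 0 = sideSum co R a := by
    intro a; rw [bNet_getD]; simp
  have hnet : ∀ a, (P.foldl (bNetStep co (-1)) (R.foldl (bNetStep co 1) PySem.Dict.empty)).getD a 0
      = sideSum co R a - sideSum co P a := by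
    intro a; rw [bNet_getD, hnetR]; ring
  have hnodup : (P.foldl (bNetStep co (-1)) (R.foldl (bNetStep co 1) PySem.Dict.empty)).keys.Nodup :=
    bNet_nodup co (-1) P _ (bNet_nodup co 1 R _ PySem.Dict.nodup_keys_empty)
  have hnetmem : ∀ a, a ∈ (P.foldl (bNetStep co (-1)) (R.foldl (bNetStep co 1) PySem.Dict.empty)).keys
      ↔ hasSym R a ∨ hasSym P a := by
    intro a
    rw [bNet_mem, bNet_mem]
    simp [PySem.Dict.keys_empty]
  rw [Bool.and_eq_true, PySem.Set.equal_iff]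
  constructor
  · rintro ⟨h1, h2⟩
    have hks : ∀ a, hasSym R a ↔ hasSym P a := by
      intro a
      have := h1 a
      rw [bKeys_mem, bKeys_mem] at this
      simpa using this
    refine ⟨hks, fun a => ?_⟩
    by_cases ha : hasSym R a ∨ hasSym P a
    · have hmem := (hnetmem a).mpr ha
      rw [List.all_eq_true] at h2
      have := h2 _ (by
        rw [PySem.Dict.values_eq_map_keys _ hnodup 0]
        exact List.mem_map.mpr ⟨a, hmem, rfl⟩)
      rw [beq_iff_eq] at this
      have := hnet a ▸ this
      omega
    · push_neg at ha
      rw [sideSum_zero co R a ha.1, sideSum_zero co P a ha.2]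
  · rintro ⟨hk, hv⟩
    constructor
    · intro a
      rw [bKeys_mem, bKeys_mem]
      simpa using hk a
    · rw [List.all_eq_true]
      intro v hvmem
      rw [PySem.Dict.values_eq_map_keys _ hnodup 0] at hvmem
      obtain ⟨a, _, rfl⟩ := List.mem_map.mp hvmem
      rw [beq_iff_eq, hnet a, hv a]
      ring

-- ===== VERDICT (by name: the statement is the Claim_ definition above) =====
theorem verify_balance_spec : Claim_equal_verify_balance := by
  intro reactants products coefficients _
  unfold Spec_verify_balance
  rw [Bool.eq_iff_iff, A_iff, B_iff]
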